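-- pv_equiv track=rewrite | github.com/ForceMind/AI-Driven-Slot-Game-Demo | backend/outcome_engine.py | _check_line_match
-- ===== SOURCE A (Python) =====
-- from typing import List, Dict, Tuple, Any, Optional
--
-- def _check_line_match(line: List[str]) -> Tuple[int, str]:
--     if not line: return 0, ""
--
--     first = line[0]
--     match_id = first
--
--     # 处理百搭（WILD）
--     if first == "WILD":
--         # 找到第一个非百搭符号
--         for s in line:
--             if s != "WILD":
--                 match_id = s
--                 break
--         # 如果全是百搭，match_id 仍为 WILD
--
--     count = 0
--     for s in line:
--         if s == match_id or s == "WILD":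
--             count += 1
--         else:
--             break
--
--     return count, match_id
-- ===== SOURCE B (Python) =====
-- from typing import List, Tuple
--
-- def _check_line_match(line: List[str]) -> Tuple[int, str]:
--     # Count the longest prefix whose non-WILD symbols form at most one
--     # distinct value, tracked with a set; the match id is that value
--     # (or "WILD" if the set stays empty).
--     if not line:
--         return 0, ""
--     seen = set()
--     count = 0
--     for s in line:
--         if s != "WILD" and s not in seen:
--             if seen:
--                 break
--             seen.add(s)
--         count += 1
--     return count, seen.pop() if seen else "WILD"
-- ===== Notes on version B (the rewrite author's own statement) =====
-- stated objective: alternative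
-- what changed: B drops A's find-first-non-WILD scan and match_id bookkeeping entirely: it counts the longest prefix whose distinct non-WILD symbols, tracked in a set, number at most one, breaking when a second distinct symbol appears, and reads the match id off the set afterwards.
import Mathlib
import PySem

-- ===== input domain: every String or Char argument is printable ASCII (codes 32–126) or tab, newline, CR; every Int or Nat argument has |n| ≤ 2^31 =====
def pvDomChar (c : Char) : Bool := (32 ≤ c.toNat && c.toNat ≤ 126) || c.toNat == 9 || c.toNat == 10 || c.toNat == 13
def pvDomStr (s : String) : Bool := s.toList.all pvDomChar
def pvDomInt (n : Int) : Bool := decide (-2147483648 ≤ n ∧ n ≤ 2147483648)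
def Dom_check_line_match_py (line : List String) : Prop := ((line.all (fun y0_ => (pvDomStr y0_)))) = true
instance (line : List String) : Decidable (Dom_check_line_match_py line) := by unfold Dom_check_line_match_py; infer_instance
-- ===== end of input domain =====

-- B replaces A's match_id machinery by a set of distinct non-WILD symbols seen,
-- breaking on the second distinct one (objective: alternative; same O(n) cost).

-- ===== PORT A =====
-- A's first loop: find the first non-WILD symbol (break on first hit)
def pvFindNonWild : List String → Option String
  | [] => none
  | s :: t => if s ≠ "WILD" then some s else pvFindNonWild t

-- A's second loop: count leading symbols equal to match_id or WILD (break otherwise)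
def pvCountLead (mid : String) : List String → Int
  | [] => 0
  | s :: t => if s = mid ∨ s = "WILD" then 1 + pvCountLead mid t else 0

def check_line_match_py (line : List String) : Int × String :=
  match line with
  | [] => (0, "")
  | first :: _ =>
    let match_id := if first = "WILD" then (pvFindNonWild line).getD first else first
    (pvCountLead match_id line, match_id)

-- ===== PORT B =====
-- B's loop: state (seen : set of distinct non-WILD symbols, count); break when a
-- second distinct non-WILD symbol appears; returns (count, seen)
def pvLoopB : List String → PySem.Set String → Int → Int × PySem.Set String
  | [], seen, c => (c, seen)
  | s :: t, seen, c =>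
    if s ≠ "WILD" ∧ ¬ (PySem.Set.contains seen s = true) then
      if seen ≠ [] then (c, seen)
      else pvLoopB t (PySem.Set.add seen s) (c + 1)
    else pvLoopB t seen (c + 1)

def check_line_match_py_alt (line : List String) : Int × String :=
  match line with
  | [] => (0, "")
  | _ =>
    let r := pvLoopB line PySem.Set.empty 0
    -- 'seen.pop() if seen else "WILD"': seen holds at most one element here,
    -- so Python's arbitrary pop order cannot be observed
    (r.1, match r.2 with | [] => "WILD" | m :: _ => m)

-- ===== PRECONDITION & SPEC =====
def Spec_check_line_match_py (line : List String) (out : Int × String) : Prop := out = check_line_match_py_alt line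
instance (line : List String) (out : Int × String) : Decidable (Spec_check_line_match_py line out) := by unfold Spec_check_line_match_py; infer_instance

-- ===== CLAIM (what is proved, stated in full; the proofs are below) =====
def Claim_equal_check_line_match_py : Prop := ∀ (line : List String), Dom_check_line_match_py line → Spec_check_line_match_py line (check_line_match_py line)

-- ===== LEMMAS AND PROOFS =====
lemma pvLoopB_singleton (l : List String) (m : String) (c : Int) :
    pvLoopB l [m] c = (c + pvCountLead m l, [m]) := by
  induction l generalizing c with
  | nil => simp [pvLoopB, pvCountLead]
  | cons s t ih =>
    simp only [pvLoopB, pvCountLead, PySem.Set.contains]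
    by_cases h : s = m ∨ s = "WILD"
    · rcases h with h | h <;> subst h <;> simp [ih] <;> ring
    · push Not at h
      simp [h.1, h.2]

lemma pvLoopB_empty (l : List String) (c : Int) :
    pvLoopB l [] c =
      (match pvFindNonWild l with
       | none => (c + l.length, ([] : PySem.Set String))
       | some m => (c + pvCountLead m l, [m])) := by
  induction l generalizing c with
  | nil => simp [pvLoopB, pvFindNonWild]
  | cons s t ih =>
    by_cases hw : s = "WILD"
    · subst hw
      simp only [pvLoopB, pvFindNonWild, pvCountLead]
      simp only [ih]
      cases h : pvFindNonWild t <;> simp <;> ring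
    · simp only [pvLoopB, pvFindNonWild, pvCountLead, PySem.Set.contains,
        PySem.Set.add]
      simp [hw, pvLoopB_singleton]
      ring

-- ===== VERDICT (by name: the statement is the Claim_ definition above) =====
theorem check_line_match_py_spec : Claim_equal_check_line_match_py := by
  intro line _
  unfold Spec_check_line_match_py
  match line with
  | [] => rfl
  | first :: t =>
    simp only [check_line_match_py, check_line_match_py_alt, PySem.Set.empty,
      pvLoopB_empty]
    by_cases hw : first = "WILD"
    · subst hw
      simp only [pvFindNonWild, pvCountLead]
      cases h : pvFindNonWild t with
      | none =>
        -- all WILD: A counts the whole line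
        have : ∀ u : List String, pvFindNonWild u = none →
            pvCountLead "WILD" u = (u.length : Int) := by
          intro u
          induction u with
          | nil => simp [pvCountLead]
          | cons a b ihb =>
            intro ha
            simp only [pvFindNonWild] at ha
            by_cases haw : a = "WILD"
            · subst haw
              simp only [pvCountLead]
              simp [ihb (by simpa using ha)]
              ring
            · simp [haw] at ha
        simp [this t (by simpa using h)]
        ring
      | some m => simp
    · simp [pvFindNonWild, hw]
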